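-- pv_equiv track=rewrite | github.com/kobeomseok95/codingTest | programmers/level3/68646.py | get_balloon_count
-- ===== SOURCE A (Python) =====
-- def get_balloon_count(balloon):
--     answer = 0
--     first = min(balloon[0][1], balloon[1][1])
--     second = max(balloon[0][1], balloon[1][1])
--     for i in range(2, len(balloon)):
--         current = balloon[i][1]
--         if first < current < second:
--             continue
--
--         answer += 1
--         first = min(first, current)
--         second = max(second, current)
--
--     return answer
-- ===== SOURCE B (Python) =====
-- def get_balloon_count(balloon):
--     # table-first: build inclusive prefix-min/max tables, then count in a separate zip pass
--     vals = [b[1] for b in balloon]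
--     mins = []
--     maxs = []
--     lo = hi = vals[0]
--     for v in vals:
--         lo = min(lo, v)
--         hi = max(hi, v)
--         mins.append(lo)
--         maxs.append(hi)
--     return sum(0 if m < v < M else 1
--                for v, m, M in zip(vals[2:], mins[1:], maxs[1:]))
-- ===== Notes on version B (the rewrite author's own statement) =====
-- stated objective: alternative
-- what changed: A fuses maintaining the running min/max with counting inside one conditional-update loop; B first builds inclusive prefix-min/prefix-max tables in one unconditional pass and then counts failures in a separate zip pass over the tables (correct because the unconditional running min/max equal A's conditionally-updated ones).
import Mathlib
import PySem

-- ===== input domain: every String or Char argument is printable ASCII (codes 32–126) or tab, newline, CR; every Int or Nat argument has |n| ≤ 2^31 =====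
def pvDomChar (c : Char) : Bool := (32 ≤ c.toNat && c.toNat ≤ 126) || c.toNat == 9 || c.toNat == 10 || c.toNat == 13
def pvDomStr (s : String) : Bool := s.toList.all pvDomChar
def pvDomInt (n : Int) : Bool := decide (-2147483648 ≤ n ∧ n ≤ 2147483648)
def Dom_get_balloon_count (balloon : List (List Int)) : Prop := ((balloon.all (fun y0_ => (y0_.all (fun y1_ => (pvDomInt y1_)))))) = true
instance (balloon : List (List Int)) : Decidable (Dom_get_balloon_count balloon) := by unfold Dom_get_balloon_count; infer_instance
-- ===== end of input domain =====

-- B builds prefix-min/max tables first and counts in a separate pass; equivalence of return values, no speed claim.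

-- ===== PORT A =====
def get_balloon_count (balloon : List (List Int)) : Int :=
  let first := min (PySem.List.pyGetD (PySem.List.pyGetD balloon 0 []) 1 0)
                   (PySem.List.pyGetD (PySem.List.pyGetD balloon 1 []) 1 0)
  let second := max (PySem.List.pyGetD (PySem.List.pyGetD balloon 0 []) 1 0)
                    (PySem.List.pyGetD (PySem.List.pyGetD balloon 1 []) 1 0)
  let st := (PySem.List.pyRange 2 (balloon.length : Int) 1).foldl
    (fun (st : Int × Int × Int) i =>
      let current := PySem.List.pyGetD (PySem.List.pyGetD balloon i []) 1 0
      if st.2.1 < current ∧ current < st.2.2 then st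
      else (st.1 + 1, min st.2.1 current, max st.2.2 current))
    (0, first, second)
  st.1

-- ===== PORT B =====
def get_balloon_count_alt (balloon : List (List Int)) : Int :=
  let vals := balloon.map (fun b => PySem.List.pyGetD b 1 0)
  let v0 := PySem.List.pyGetD vals 0 0
  let st := vals.foldl
    (fun (st : Int × Int × List Int × List Int) v =>
      let lo := min st.1 v
      let hi := max st.2.1 v
      (lo, hi, st.2.2.1 ++ [lo], st.2.2.2 ++ [hi]))
    (v0, v0, [], [])
  let mins := st.2.2.1
  let maxs := st.2.2.2
  (((PySem.List.slice vals (some 2) none).zip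
      ((PySem.List.slice mins (some 1) none).zip (PySem.List.slice maxs (some 1) none))).foldl
    (fun acc t => acc + (if t.2.1 < t.1 ∧ t.1 < t.2.2 then 0 else 1)) 0)

-- ===== PRECONDITION & SPEC =====
-- Pre_ excludes exactly the inputs on which Python A raises IndexError: fewer than two balloons, or a row without index 1.
def Pre_get_balloon_count (balloon : List (List Int)) : Prop :=
  2 ≤ balloon.length ∧ ∀ r ∈ balloon, 2 ≤ r.length
instance (balloon : List (List Int)) : Decidable (Pre_get_balloon_count balloon) := by
  unfold Pre_get_balloon_count; infer_instance
def pvWitness_get_balloon_count : List (List Int) := [[1, 5], [2, 4], [3, 6]]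

def Spec_get_balloon_count (balloon : List (List Int)) (out : Int) : Prop := out = get_balloon_count_alt balloon
instance (balloon : List (List Int)) (out : Int) : Decidable (Spec_get_balloon_count balloon out) := by unfold Spec_get_balloon_count; infer_instance

-- ===== CLAIM (what is proved, stated in full; the proofs are below) =====
def Claim_equal_get_balloon_count : Prop := ∀ (balloon : List (List Int)), Dom_get_balloon_count balloon → Pre_get_balloon_count balloon → Spec_get_balloon_count balloon (get_balloon_count balloon)

-- ===== LEMMAS AND PROOFS =====

/-- The common count: prefix min/max updated unconditionally, increment when not strictly inside. -/
def pvCnt (f s : Int) : List Int → Int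
  | [] => 0
  | v :: vs => (if f < v ∧ v < s then 0 else 1) + pvCnt (min f v) (max s v) vs

/-- The prefix (min, max) pairs after each further element. -/
def pvPref (f s : Int) : List Int → List (Int × Int)
  | [] => []
  | v :: vs => (min f v, max s v) :: pvPref (min f v) (max s v) vs

theorem pvA_foldl (rows : List (List Int)) : ∀ (a f s : Int),
    (rows.foldl (fun (st : Int × Int × Int) row =>
        if st.2.1 < PySem.List.pyGetD row 1 0 ∧ PySem.List.pyGetD row 1 0 < st.2.2 then st
        else (st.1 + 1, min st.2.1 (PySem.List.pyGetD row 1 0),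
              max st.2.2 (PySem.List.pyGetD row 1 0))) (a, f, s)).1
      = a + pvCnt f s (rows.map (fun b => PySem.List.pyGetD b 1 0)) := by
  induction rows with
  | nil => intro a f s; simp [pvCnt]
  | cons row rows ih =>
    intro a f s
    set v := PySem.List.pyGetD row 1 0 with hv
    simp only [List.foldl_cons, List.map_cons, pvCnt, ← hv]
    by_cases h : f < v ∧ v < s
    · simp only [if_pos h]
      have h1 : min f v = f := min_eq_left h.1.le
      have h2 : max s v = s := max_eq_left h.2.le
      rw [h1, h2]
      simpa using ih a f s
    · simp only [if_neg h, ih]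
      ring

theorem pvB_build (vs : List Int) : ∀ (f s : Int) (ms xs : List Int),
    vs.foldl (fun (st : Int × Int × List Int × List Int) v =>
        (min st.1 v, max st.2.1 v, st.2.2.1 ++ [min st.1 v], st.2.2.2 ++ [max st.2.1 v]))
      (f, s, ms, xs)
    = ((pvPref f s vs).foldl (fun p q => min p q.1) f,
       (pvPref f s vs).foldl (fun p q => max p q.2) s,
       ms ++ (pvPref f s vs).map Prod.fst,
       xs ++ (pvPref f s vs).map Prod.snd) := by
  induction vs with
  | nil => intro f s ms xs; simp [pvPref]
  | cons v vs ih =>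
    intro f s ms xs
    simp only [List.foldl_cons, pvPref, List.map_cons, ih, List.foldl_cons]
    simp

theorem pvB_count (rest : List Int) : ∀ (f s : Int),
    (List.map (fun x : Int × Int × Int => if x.2.1 < x.1 ∧ x.1 < x.2.2 then (0 : Int) else 1)
        (rest.zip ((f, s) :: pvPref f s rest))).sum = pvCnt f s rest := by
  induction rest with
  | nil => intro f s; simp [pvCnt]
  | cons v vs ih =>
    intro f s
    simp only [pvPref, List.zip_cons_cons, List.map_cons, List.sum_cons, pvCnt, ih]

theorem get_balloon_count_spec : Claim_equal_get_balloon_count := by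
  intro balloon _ hpre
  unfold Spec_get_balloon_count
  obtain ⟨hlen, -⟩ := hpre
  match balloon, hlen with
  | b0 :: b1 :: rest, _ =>
    unfold get_balloon_count get_balloon_count_alt
    simp only [List.map_cons, PySem.List.pyGetD_zero_cons]
    rw [PySem.List.foldl_pyRange_pyGetD' (b0 :: b1 :: rest) []
        (fun (st : Int × Int × Int) row =>
          if st.2.1 < PySem.List.pyGetD row 1 0 ∧ PySem.List.pyGetD row 1 0 < st.2.2 then st
          else (st.1 + 1, min st.2.1 (PySem.List.pyGetD row 1 0),
                max st.2.2 (PySem.List.pyGetD row 1 0)))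
        _ (by norm_num)]
    have hb1 : PySem.List.pyGetD (b0 :: b1 :: rest) 1 ([] : List Int) = b1 := by simp [pysem]
    rw [hb1]
    simp only [show ((2:Int)).toNat = 2 from rfl, List.drop_succ_cons, List.drop_zero]
    rw [pvA_foldl]
    rw [PySem.List.slice_from _ (by norm_num), PySem.List.slice_from _ (by norm_num),
        PySem.List.slice_from _ (by norm_num)]
    rw [pvB_build]
    simp only [pysem, List.nil_append, pvPref, min_self, max_self,
      show ((2:Int)).toNat = 2 from rfl, show ((1:Int)).toNat = 1 from rfl,
      List.drop_succ_cons, List.drop_zero, List.map_cons]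
    rw [List.zip_cons_cons, List.zip_map']
    simp only [Prod.mk.eta, List.map_id_fun', id_eq]
    rw [pvB_count]
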